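-- pv_equiv track=rewrite | github.com/ezraedl/real-estate-crm-scraper | temp/debug_scripts/analyze_scoring_methods.py | _score_special_sale_types
-- ===== SOURCE A (Python) =====
-- from typing import Dict, List, Any, Optional
--
-- def _score_special_sale_types(analysis_data: Dict[str, Any]) -> tuple[float, str]:
--     """Score special sale types (0-5 points)"""
--     sale_types = analysis_data.get('special_sale_types', [])
--     if 'auction' in sale_types or 'reo' in sale_types:
--         type_str = '/'.join([st for st in sale_types if st in ['auction', 'reo']])
--         return 5, f"Type: {type_str}"
--     elif 'probate' in sale_types:
--         return 4, "Type: probate"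
--     elif 'short_sale' in sale_types:
--         return 3, "Type: short_sale"
--     elif 'as_is' in sale_types:
--         return 2, "Type: as_is"
--     return 0, ""
-- ===== SOURCE B (Python) =====
-- _SCORE = {'auction': 5, 'reo': 5, 'probate': 4, 'short_sale': 3, 'as_is': 2}
-- _LABEL = {4: 'probate', 3: 'short_sale', 2: 'as_is'}
--
-- def _score_special_sale_types(analysis_data):
--     sale_types = analysis_data.get('special_sale_types', [])
--     best = 0
--     for st in sale_types:
--         best = max(best, _SCORE.get(st, 0))
--     if best == 0:
--         return 0, ""
--     if best == 5:
--         label = '/'.join(st for st in sale_types if _SCORE.get(st, 0) == 5)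
--     else:
--         label = _LABEL[best]
--     return best, f"Type: {label}"
-- ===== Notes on version B (the rewrite author's own statement) =====
-- stated objective: alternative
-- what changed: Instead of a prioritized if-elif membership cascade, B makes one accumulator pass over sale_types taking the max of per-type scores from a score map, then derives the label from the winning score (joining the score-5 types, or looking the label up by score).
import Mathlib
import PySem

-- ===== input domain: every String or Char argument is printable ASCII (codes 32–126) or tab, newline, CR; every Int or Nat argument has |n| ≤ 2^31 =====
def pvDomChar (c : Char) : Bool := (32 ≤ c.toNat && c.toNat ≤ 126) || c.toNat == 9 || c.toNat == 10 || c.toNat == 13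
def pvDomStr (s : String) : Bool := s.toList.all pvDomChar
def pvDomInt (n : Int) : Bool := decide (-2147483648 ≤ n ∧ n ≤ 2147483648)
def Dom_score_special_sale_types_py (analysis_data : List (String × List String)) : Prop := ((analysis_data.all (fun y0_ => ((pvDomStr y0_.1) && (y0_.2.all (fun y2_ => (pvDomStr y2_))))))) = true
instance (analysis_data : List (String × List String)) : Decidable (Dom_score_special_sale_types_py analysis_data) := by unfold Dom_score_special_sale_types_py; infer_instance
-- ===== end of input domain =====

-- B replaces A's prioritized if-elif cascade with a single max-accumulator pass over a score map, deriving the label from the winning score (objective: alternative).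

-- ===== PORT A =====
def score_special_sale_types_py (analysis_data : List (String × List String)) : Int × String :=
  let sale_types := PySem.Dict.getD (PySem.Dict.mk analysis_data) "special_sale_types" []
  if sale_types.contains "auction" || sale_types.contains "reo" then
    let type_str := PySem.Str.join "/" (sale_types.filter (fun st => (["auction", "reo"] : List String).contains st))
    (5, "Type: " ++ type_str)
  else if sale_types.contains "probate" then (4, "Type: probate")
  else if sale_types.contains "short_sale" then (3, "Type: short_sale")
  else if sale_types.contains "as_is" then (2, "Type: as_is")
  else (0, "")

-- ===== PORT B =====
def pvScoreDict : PySem.Dict String Int :=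
  PySem.Dict.mk [("auction", 5), ("reo", 5), ("probate", 4), ("short_sale", 3), ("as_is", 2)]
-- _LABEL[best] is plain indexing in Source B; it is only reached with best ∈ {2,3,4}, all present, so getD "" is exact there
def pvLabelDict : PySem.Dict Int String :=
  PySem.Dict.mk [((4 : Int), "probate"), (3, "short_sale"), (2, "as_is")]

def score_special_sale_types_py_alt (analysis_data : List (String × List String)) : Int × String :=
  let sale_types := PySem.Dict.getD (PySem.Dict.mk analysis_data) "special_sale_types" []
  let best := sale_types.foldl (fun b st => max b (PySem.Dict.getD pvScoreDict st 0)) 0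
  if best == 0 then (0, "")
  else
    let label :=
      if best == 5 then
        PySem.Str.join "/" (sale_types.filter (fun st => PySem.Dict.getD pvScoreDict st 0 == 5))
      else PySem.Dict.getD pvLabelDict best ""
    (best, "Type: " ++ label)

-- ===== PRECONDITION & SPEC =====
def Spec_score_special_sale_types_py (analysis_data : List (String × List String)) (out : Int × String) : Prop := out = score_special_sale_types_py_alt analysis_data
instance (analysis_data : List (String × List String)) (out : Int × String) : Decidable (Spec_score_special_sale_types_py analysis_data out) := by unfold Spec_score_special_sale_types_py; infer_instance

-- ===== CLAIM =====
def Claim_equal_score_special_sale_types_py : Prop := ∀ (analysis_data : List (String × List String)), Dom_score_special_sale_types_py analysis_data → Spec_score_special_sale_types_py analysis_data (score_special_sale_types_py analysis_data)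

-- ===== LEMMAS AND PROOFS =====

-- A's cascade value
def pvV (sts : List String) : Int :=
  if sts.contains "auction" || sts.contains "reo" then 5
  else if sts.contains "probate" then 4
  else if sts.contains "short_sale" then 3
  else if sts.contains "as_is" then 2
  else 0

theorem pv_get?_nil {K V : Type} [BEq K] (k : K) :
    (PySem.Dict.mk ([] : List (K × V))).get? k = none := rfl

theorem pvScore_eq (st : String) :
    PySem.Dict.getD pvScoreDict st 0 =
      if "auction" = st then 5 else if "reo" = st then 5
      else if "probate" = st then 4 else if "short_sale" = st then 3
      else if "as_is" = st then 2 else 0 := by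
  simp only [pvScoreDict, PySem.Dict.getD_eq_get?_getD, PySem.Dict.get?_mk_cons,
    pv_get?_nil, beq_iff_eq]
  split_ifs <;> rfl

theorem pvV_bounds (sts : List String) : pvV sts = 0 ∨ pvV sts = 2 ∨ pvV sts = 3 ∨ pvV sts = 4 ∨ pvV sts = 5 := by
  unfold pvV; split_ifs <;> simp

theorem pv_max_score (st : String) (rest : List String) :
    max (PySem.Dict.getD pvScoreDict st 0) (pvV rest) = pvV (st :: rest) := by
  rw [pvScore_eq]
  simp only [pvV, List.contains_cons, Bool.or_eq_true, beq_iff_eq]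
  by_cases h1 : "auction" = st <;> by_cases h2 : "reo" = st <;>
    by_cases h3 : "probate" = st <;> by_cases h4 : "short_sale" = st <;>
    by_cases h5 : "as_is" = st <;>
    simp only [h1, h2, h3, h4, h5, if_pos, if_neg, eq_comm, not_false_iff, false_or, true_or] <;>
    split_ifs <;> simp_all

theorem pv_fold (sts : List String) (b : Int) (hb : 0 ≤ b) :
    sts.foldl (fun b st => max b (PySem.Dict.getD pvScoreDict st 0)) b = max b (pvV sts) := by
  induction sts generalizing b with
  | nil => simp [pvV]; omega
  | cons st rest ih =>
    simp only [List.foldl_cons, ih (max b (PySem.Dict.getD pvScoreDict st 0)) (le_max_of_le_left hb)]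
    rw [← pv_max_score, max_assoc]

theorem pv_pred (st : String) :
    (PySem.Dict.getD pvScoreDict st 0 == 5) = (["auction", "reo"] : List String).contains st := by
  rw [pvScore_eq]
  by_cases h1 : st = "auction"
  · subst h1; decide
  · by_cases h2 : st = "reo"
    · subst h2; decide
    · rw [if_neg (fun h => h1 h.symm), if_neg (fun h => h2 h.symm)]
      have c1 : (st == "auction") = false := beq_eq_false_iff_ne.mpr h1
      have c2 : (st == "reo") = false := beq_eq_false_iff_ne.mpr h2
      simp only [List.contains_cons, List.contains_nil, c1, c2, Bool.or_false, Bool.false_or]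
      split_ifs <;> rfl

theorem pv_filter5 (sts : List String) :
    sts.filter (fun st => PySem.Dict.getD pvScoreDict st 0 == 5) =
      sts.filter (fun st => (["auction", "reo"] : List String).contains st) := by
  apply List.filter_congr
  intro st _
  exact pv_pred st

-- ===== VERDICT =====
theorem score_special_sale_types_py_spec : Claim_equal_score_special_sale_types_py := by
  intro ad _
  unfold Spec_score_special_sale_types_py
  simp only [score_special_sale_types_py, score_special_sale_types_py_alt]
  generalize PySem.Dict.getD (PySem.Dict.mk ad) "special_sale_types" ([] : List String) = sts
  rw [pv_fold sts 0 le_rfl]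
  have hmax : max (0 : Int) (pvV sts) = pvV sts := by
    rcases pvV_bounds sts with h | h | h | h | h <;> rw [h] <;> rfl
  rw [hmax, pv_filter5]
  unfold pvV
  split_ifs <;> simp_all [pvLabelDict, PySem.Dict.getD_eq_get?_getD,
    PySem.Dict.get?_mk_cons, pv_get?_nil]
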